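-- pv_equiv track=rewrite | github.com/helpfuldolphin/mathledger | tools/hermetic/reshard_history.py | partition_by_time_window
-- ===== SOURCE A (Python) =====
-- from typing import Dict, List, Optional
--
-- def partition_by_time_window(history: List[Dict], num_shards: int) -> List[List[Dict]]:
--     """
--     Partition history into equal-sized time windows.
--
--     Args:
--         history: List of history entries
--         num_shards: Number of shards to create
--
--     Returns:
--         List of shard partitions (each partition is a list of entries)
--     """
--     if not history:
--         return []
--
--     entries_per_shard = max(1, len(history) // num_shards)
--     remainder = len(history) % num_shards
--
--     shards = []
--     start_idx = 0
--
--     for i in range(num_shards):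
--         extra = 1 if i < remainder else 0
--         end_idx = start_idx + entries_per_shard + extra
--
--         shard_entries = history[start_idx:end_idx]
--         if shard_entries:
--             shards.append(shard_entries)
--         else:
--             shards.append([])
--
--         start_idx = end_idx
--
--     return shards
-- ===== SOURCE B (Python) =====
-- def partition_by_time_window(history, num_shards):
--     """Partition history into num_shards contiguous windows: compute the list of
--     shard sizes first, then consume the list front-to-back, splitting off each
--     shard's prefix."""
--     if not history:
--         return []
--     entries_per_shard = max(1, len(history) // num_shards)
--     remainder = len(history) % num_shards
--     sizes = [entries_per_shard + 1] * remainder + [entries_per_shard] * (num_shards - remainder)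
--     shards = []
--     rest = history
--     for size in sizes:
--         shards.append(rest[:size])
--         rest = rest[size:]
--     return shards
-- ===== Notes on version B (the rewrite author's own statement) =====
-- stated objective: alternative
-- what changed: Instead of slicing history by a running start index per shard, B first builds the full list of shard sizes (remainder copies of eps+1 followed by eps's) and then consumes the list front-to-back, splitting off each shard's prefix from the remaining suffix.
import Mathlib
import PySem

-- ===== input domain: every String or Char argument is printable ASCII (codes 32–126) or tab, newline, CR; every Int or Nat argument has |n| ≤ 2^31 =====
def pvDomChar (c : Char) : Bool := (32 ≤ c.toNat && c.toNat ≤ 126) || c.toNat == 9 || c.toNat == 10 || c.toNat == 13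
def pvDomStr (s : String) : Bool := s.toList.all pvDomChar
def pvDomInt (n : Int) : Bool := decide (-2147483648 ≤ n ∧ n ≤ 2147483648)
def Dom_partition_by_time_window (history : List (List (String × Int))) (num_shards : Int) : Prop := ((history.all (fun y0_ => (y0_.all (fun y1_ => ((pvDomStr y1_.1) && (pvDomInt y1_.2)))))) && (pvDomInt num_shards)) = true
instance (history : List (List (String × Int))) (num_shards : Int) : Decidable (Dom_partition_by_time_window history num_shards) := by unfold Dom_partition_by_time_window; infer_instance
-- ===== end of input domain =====

-- B builds the list of shard sizes first and then consumes the history list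
-- front-to-back, splitting each shard off the remaining suffix, instead of
-- A's loop slicing by a running start index; same cost, different decomposition.

-- ===== PORT A =====
def partition_by_time_window (history : List (List (String × Int))) (num_shards : Int) : List (List (List (String × Int))) :=
  if history = [] then []
  else
    let entries_per_shard : Int := max 1 (PySem.Int.floordiv (history.length : Int) num_shards)
    let remainder : Int := PySem.Int.mod (history.length : Int) num_shards
    let st := (PySem.List.pyRange 0 num_shards 1).foldl
      (fun (st : List (List (List (String × Int))) × Int) i =>
        let extra : Int := if i < remainder then 1 else 0
        let end_idx := st.2 + entries_per_shard + extra
        let shard_entries := PySem.List.slice history (some st.2) (some end_idx)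
        (if shard_entries ≠ [] then st.1 ++ [shard_entries] else st.1 ++ [[]], end_idx))
      ([], 0)
    st.1

-- ===== PORT B =====
def partition_by_time_window_alt (history : List (List (String × Int))) (num_shards : Int) : List (List (List (String × Int))) :=
  if history = [] then []
  else
    let eps : Int := max 1 (PySem.Int.floordiv (history.length : Int) num_shards)
    let rem : Int := PySem.Int.mod (history.length : Int) num_shards
    -- Python list repetition [x]*k gives [] for k ≤ 0, hence .toNat
    let sizes : List Int := List.replicate rem.toNat (eps + 1) ++ List.replicate (num_shards - rem).toNat eps
    (sizes.foldl
      (fun (st : List (List (List (String × Int))) × List (List (String × Int))) size =>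
        (st.1 ++ [PySem.List.slice st.2 none (some size)], PySem.List.slice st.2 (some size) none))
      ([], history)).1

-- ===== PRECONDITION & SPEC =====
-- Pre_ excludes exactly the inputs where both A and B raise ZeroDivisionError: nonempty history with num_shards = 0.
def Pre_partition_by_time_window (history : List (List (String × Int))) (num_shards : Int) : Prop :=
  history = [] ∨ num_shards ≠ 0
instance (history : List (List (String × Int))) (num_shards : Int) : Decidable (Pre_partition_by_time_window history num_shards) := by unfold Pre_partition_by_time_window; infer_instance
def pvWitness_partition_by_time_window : (List (List (String × Int))) × Int := ([[("a", 1)], [("b", 2)], [("c", 3)]], 2)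

def Spec_partition_by_time_window (history : List (List (String × Int))) (num_shards : Int) (out : List (List (List (String × Int)))) : Prop := out = partition_by_time_window_alt history num_shards
instance (history : List (List (String × Int))) (num_shards : Int) (out : List (List (List (String × Int)))) : Decidable (Spec_partition_by_time_window history num_shards out) := by unfold Spec_partition_by_time_window; infer_instance

-- ===== CLAIM (what is proved, stated in full; the proofs are below) =====
def Claim_equal_partition_by_time_window : Prop := ∀ (history : List (List (String × Int))) (num_shards : Int), Dom_partition_by_time_window history num_shards → Pre_partition_by_time_window history num_shards → Spec_partition_by_time_window history num_shards (partition_by_time_window history num_shards)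

-- ===== LEMMAS AND PROOFS =====

-- the sizes actually used by A's loop from index k on (k ≥ rem): all eps
theorem pv_sizes_tail (eps rem n : Int) :
    ∀ k : Int, rem ≤ k →
    (PySem.List.pyRange k n 1).map (fun i => eps + if i < rem then (1:Int) else 0)
      = List.replicate (n - k).toNat eps := by
  intro k hk
  by_cases h : k < n
  · rw [PySem.List.pyRange_one_cons h, List.map_cons, if_neg (by omega),
      show (n - k).toNat = (n - (k+1)).toNat + 1 by omega, List.replicate_succ,
      pv_sizes_tail eps rem n (k+1) (by omega)]
    simp
  · rw [PySem.List.pyRange_one_eq_nil (by omega), show (n - k).toNat = 0 by omega]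
    simp
termination_by k => (n - k).toNat
decreasing_by omega

-- A's per-index size function over the whole range equals B's sizes list
theorem pv_sizes (eps rem n : Int) (h0 : 0 ≤ rem) (hrn : rem ≤ n) :
    ∀ k : Int, k ≤ rem →
    (PySem.List.pyRange k n 1).map (fun i => eps + if i < rem then (1:Int) else 0)
      = List.replicate (rem - k).toNat (eps + 1) ++ List.replicate (n - rem).toNat eps := by
  intro k hk
  by_cases h : k < rem
  · rw [PySem.List.pyRange_one_cons (by omega), List.map_cons, if_pos h,
      show (rem - k).toNat = (rem - (k+1)).toNat + 1 by omega, List.replicate_succ,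
      pv_sizes eps rem n h0 hrn (k+1) (by omega)]
    simp
  · rw [show k = rem by omega, show (rem - rem).toNat = 0 by omega,
      pv_sizes_tail eps rem n rem (le_refl rem)]
    simp
termination_by k => (rem - k).toNat
decreasing_by omega

-- core: A-style fold (slicing history at a running start) = B-style fold
-- (consuming the suffix), for any list of nonnegative sizes
theorem pv_consume (history : List (List (String × Int))) :
    ∀ (sizes : List Int) (acc : List (List (List (String × Int)))) (start : Int),
    0 ≤ start → (∀ s ∈ sizes, 0 ≤ s) →
    (sizes.foldl
      (fun (st : List (List (List (String × Int))) × Int) size =>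
        let end_idx := st.2 + size
        let shard_entries := PySem.List.slice history (some st.2) (some end_idx)
        (if shard_entries ≠ [] then st.1 ++ [shard_entries] else st.1 ++ [[]], end_idx))
      (acc, start)).1
    = (sizes.foldl
      (fun (st : List (List (List (String × Int))) × List (List (String × Int))) size =>
        (st.1 ++ [PySem.List.slice st.2 none (some size)], PySem.List.slice st.2 (some size) none))
      (acc, history.drop start.toNat)).1 := by
  intro sizes
  induction sizes with
  | nil => intro acc start _ _; rfl
  | cons s rest ih =>
    intro acc start hstart hpos
    have hs : 0 ≤ s := hpos s (by simp)
    simp only [List.foldl_cons]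
    have h1 : PySem.List.slice history (some start) (some (start + s))
        = (history.drop start.toNat).take s.toNat := by
      rw [PySem.List.slice_toNat history hstart (by omega),
        show (start + s).toNat - start.toNat = s.toNat by omega]
    have h2 : PySem.List.slice (history.drop start.toNat) none (some s)
        = (history.drop start.toNat).take s.toNat := PySem.List.slice_to _ hs
    have h3 : PySem.List.slice (history.drop start.toNat) (some s) none
        = history.drop (start + s).toNat := by
      rw [PySem.List.slice_from _ hs, List.drop_drop,
        show start.toNat + s.toNat = (start + s).toNat by omega]
    have hbody : (if PySem.List.slice history (some start) (some (start + s)) ≠ [] then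
          acc ++ [PySem.List.slice history (some start) (some (start + s))] else acc ++ [[]])
        = acc ++ [(history.drop start.toNat).take s.toNat] := by
      rw [h1]; split_ifs with h
      · rfl
      · simp only [ne_eq, not_not] at h; rw [h]
    simp only [h2, h3, hbody]
    exact ih (acc ++ [(history.drop start.toNat).take s.toNat]) (start + s) (by omega)
      (fun x hx => hpos x (by simp [hx]))

-- ===== VERDICT (by name: the statement is the Claim_ definition above) =====
theorem partition_by_time_window_spec : Claim_equal_partition_by_time_window := by
  intro history num_shards _ hpre
  unfold Spec_partition_by_time_window partition_by_time_window partition_by_time_window_alt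
  by_cases hh : history = []
  · simp [hh]
  · simp only [if_neg hh]
    have hn0 : num_shards ≠ 0 := by rcases hpre with h | h; exact absurd h hh; exact h
    set eps : Int := max 1 (PySem.Int.floordiv (history.length : Int) num_shards) with heps
    set rem : Int := PySem.Int.mod (history.length : Int) num_shards with hrem
    by_cases hn : num_shards < 0
    · -- empty range on A's side, empty sizes list on B's side
      have hb := PySem.Int.mod_neg_bounds (a := (history.length : Int)) hn
      rw [PySem.List.pyRange_one_eq_nil (by omega),
        show rem.toNat = 0 by omega, show (num_shards - rem).toNat = 0 by omega]
      simp
    · have hnpos : (0:Int) < num_shards := by omega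
      have hr0 : 0 ≤ rem := PySem.Int.mod_nonneg _ hnpos
      have hrlt : rem < num_shards := PySem.Int.mod_lt _ hnpos
      have hstep :
          (fun (st : List (List (List (String × Int))) × Int) (i : Int) =>
            let extra : Int := if i < rem then 1 else 0
            let end_idx := st.2 + eps + extra
            let shard_entries := PySem.List.slice history (some st.2) (some end_idx)
            (if shard_entries ≠ [] then st.1 ++ [shard_entries] else st.1 ++ [[]], end_idx))
          = (fun st i =>
            (fun (st : List (List (List (String × Int))) × Int) (size : Int) =>
              let end_idx := st.2 + size
              let shard_entries := PySem.List.slice history (some st.2) (some end_idx)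
              (if shard_entries ≠ [] then st.1 ++ [shard_entries] else st.1 ++ [[]], end_idx))
            st ((fun i => eps + if i < rem then (1:Int) else 0) i)) := by
        funext st i
        simp only [add_assoc]
      rw [hstep, ← List.foldl_map (f := fun i => eps + if i < rem then (1:Int) else 0)
        (g := fun (st : List (List (List (String × Int))) × Int) (size : Int) =>
          let end_idx := st.2 + size
          let shard_entries := PySem.List.slice history (some st.2) (some end_idx)
          (if shard_entries ≠ [] then st.1 ++ [shard_entries] else st.1 ++ [[]], end_idx))]
      rw [pv_sizes eps rem num_shards hr0 (by omega) 0 hr0]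
      rw [pv_consume history _ [] 0 (le_refl 0) ?_]
      · simp
      · intro s hs
        simp only [List.mem_append, List.mem_replicate] at hs
        have : (1:Int) ≤ eps := le_max_left _ _
        rcases hs with ⟨_, h⟩ | ⟨_, h⟩ <;> omega
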